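-- pv_equiv track=rewrite | github.com/pathselector-x/ci-hanabi | MCTS_agent.py | __interrupted_pile
-- ===== SOURCE A (Python) =====
-- def __interrupted_pile(table_cards, discard_pile, color):
--     for v in range(len(table_cards[color]) + 1, 6):
--         count = 3 if v == 1 else (1 if v == 5 else 2)
--         for card in discard_pile:
--             if card[0] == color and card[1] == v:
--                 count -= 1
--         if count == 0: return True
--     return False
-- ===== SOURCE B (Python) =====
-- def __interrupted_pile(table_cards, discard_pile, color):
--     played = len(table_cards[color])
--     vals = sorted(v for c, v in discard_pile if c == color)
--     i, n = 0, len(vals)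
--     while i < n:
--         v = vals[i]
--         j = i
--         while j < n and vals[j] == v:
--             j += 1
--         if played < v < 6 and j - i == (3 if v == 1 else 1 if v == 5 else 2):
--             return True
--         i = j
--     return False
-- ===== Notes on version B (the rewrite author's own statement) =====
-- stated objective: alternative
-- what changed: B sorts the discarded values of the given color and makes a single run-length scan over the sorted list, reporting True when a run of length equal to the max copy count falls in the unplayed range, instead of A's per-value rescans of the whole discard pile.
import Mathlib
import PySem

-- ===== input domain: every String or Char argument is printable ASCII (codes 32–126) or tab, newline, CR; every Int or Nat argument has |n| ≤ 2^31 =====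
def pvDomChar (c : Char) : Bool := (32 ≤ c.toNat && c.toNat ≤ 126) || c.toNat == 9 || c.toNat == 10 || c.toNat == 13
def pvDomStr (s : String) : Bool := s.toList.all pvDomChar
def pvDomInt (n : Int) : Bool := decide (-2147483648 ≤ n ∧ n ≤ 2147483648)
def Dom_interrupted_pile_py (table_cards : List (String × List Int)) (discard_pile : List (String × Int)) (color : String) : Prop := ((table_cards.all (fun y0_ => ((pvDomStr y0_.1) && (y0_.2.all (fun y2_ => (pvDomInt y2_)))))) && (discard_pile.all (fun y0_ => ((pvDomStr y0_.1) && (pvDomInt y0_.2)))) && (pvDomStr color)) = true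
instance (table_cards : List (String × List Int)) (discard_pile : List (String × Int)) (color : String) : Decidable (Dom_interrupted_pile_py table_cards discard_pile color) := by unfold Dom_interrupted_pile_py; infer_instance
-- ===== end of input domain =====

-- B replaces A's per-value rescans of the discard pile by sort-then-run-length-scan over the color's discarded values (alternative algorithm, same result).


-- max number of copies of value v (Hanabi deck: 3 ones, 1 five, 2 otherwise); used by both ports
def pvMaxv (v : Int) : Int := if v == 1 then 3 else if v == 5 then 1 else 2

-- ===== PORT A =====
-- outer loop with early return: for v in range(len(table_cards[color])+1, 6)
def interruptedLoopA (vs : List Int) (discard_pile : List (String × Int)) (color : String) : Bool :=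
  match vs with
  | [] => false
  | v :: rest =>
    let count : Int := pvMaxv v
    let count := discard_pile.foldl
      (fun c card => if card.1 == color && card.2 == v then c - 1 else c) count
    if count == 0 then true else interruptedLoopA rest discard_pile color

def interrupted_pile_py (table_cards : List (String × List Int)) (discard_pile : List (String × Int)) (color : String) : Bool :=
  match (PySem.Dict.mk table_cards).get? color with
  | none => false  -- KeyError in Python; excluded by Pre_
  | some pile =>
    interruptedLoopA (PySem.List.pyRange (PySem.List.len pile + 1) 6 1) discard_pile color

-- ===== PORT B =====
-- Source B's run scan: the inner 'while vals[j] == v' advance is the takeWhile/dropWhile split, j - i = 1 + run length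
def runScanB (played : Int) (vals : List Int) : Bool :=
  match vals with
  | [] => false
  | v :: rest =>
    let run := rest.takeWhile (fun x => x == v)
    if decide (played < v) && decide (v < 6) && ((1 + (run.length : Int)) == pvMaxv v) then true
    else runScanB played (rest.dropWhile (fun x => x == v))
termination_by vals.length
decreasing_by
  exact Nat.lt_succ_of_le (List.Sublist.length_le (List.dropWhile_sublist _))

def interrupted_pile_py_alt (table_cards : List (String × List Int)) (discard_pile : List (String × Int)) (color : String) : Bool :=
  match (PySem.Dict.mk table_cards).get? color with
  | none => false  -- KeyError in Python; excluded by Pre_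
  | some pile =>
    runScanB (PySem.List.len pile)
      (PySem.List.sorted ((discard_pile.filter (fun card => card.1 == color)).map Prod.snd) (fun x => x) false)

-- ===== PRECONDITION & SPEC =====
-- Pre_: Python raises KeyError when color is not a key of table_cards; nothing else raises.
def Pre_interrupted_pile_py (table_cards : List (String × List Int)) (discard_pile : List (String × Int)) (color : String) : Prop :=
  ((PySem.Dict.mk table_cards).get? color).isSome = true
instance (table_cards : List (String × List Int)) (discard_pile : List (String × Int)) (color : String) : Decidable (Pre_interrupted_pile_py table_cards discard_pile color) := by unfold Pre_interrupted_pile_py; infer_instance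

def pvWitness_interrupted_pile_py : (List (String × List Int)) × (List (String × Int)) × String :=
  ([("r", [1, 2])], [("r", 3), ("g", 3), ("r", 3)], "r")

def Spec_interrupted_pile_py (table_cards : List (String × List Int)) (discard_pile : List (String × Int)) (color : String) (out : Bool) : Prop := out = interrupted_pile_py_alt table_cards discard_pile color
instance (table_cards : List (String × List Int)) (discard_pile : List (String × Int)) (color : String) (out : Bool) : Decidable (Spec_interrupted_pile_py table_cards discard_pile color out) := by unfold Spec_interrupted_pile_py; infer_instance

-- ===== CLAIM (what is proved, stated in full; the proofs are below) =====
def Claim_equal_interrupted_pile_py : Prop := ∀ (table_cards : List (String × List Int)) (discard_pile : List (String × Int)) (color : String), Dom_interrupted_pile_py table_cards discard_pile color → Pre_interrupted_pile_py table_cards discard_pile color → Spec_interrupted_pile_py table_cards discard_pile color (interrupted_pile_py table_cards discard_pile color)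

-- ===== LEMMAS AND PROOFS =====

theorem pvMaxv_pos (v : Int) : 0 < pvMaxv v := by
  unfold pvMaxv; split_ifs <;> omega

-- A's inner scan counts down from init by the number of matching cards.
theorem foldl_dec_eq (dp : List (String × Int)) (color : String) (v : Int) (init : Int) :
    dp.foldl (fun c card => if card.1 == color && card.2 == v then c - 1 else c) init
      = init - (dp.countP (fun card => card.1 == color && card.2 == v) : Int) := by
  induction dp generalizing init with
  | nil => simp
  | cons hd tl ih =>
    simp only [List.foldl_cons, List.countP_cons, ih]
    by_cases h : (hd.1 == color && hd.2 == v) = true <;> simp [h] <;> omega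

theorem beq_sub_zero (m c : Int) : ((m - c == 0) : Bool) = (c == m) := by
  by_cases h : c = m
  · subst h; simp
  · have h2 : m - c ≠ 0 := by omega
    simp [h, h2]

-- A's loop is an 'any' over its value list with the exact-count test
theorem loopA_eq_any (vs : List Int) (dp : List (String × Int)) (color : String) :
    interruptedLoopA vs dp color
      = vs.any (fun v => ((dp.countP (fun card => card.1 == color && card.2 == v) : Int) == pvMaxv v)) := by
  induction vs with
  | nil => simp [interruptedLoopA]
  | cons v rest ih =>
    simp only [interruptedLoopA, List.any_cons, foldl_dec_eq, beq_sub_zero, ih]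
    by_cases h : (((dp.countP (fun card => card.1 == color && card.2 == v) : Int) == pvMaxv v) : Bool) = true <;>
      simp [h]

-- in a sorted list whose elements are all ≥ v, dropping the leading v-run removes every v
theorem count_dropWhile_zero (v : Int) (l : List Int)
    (hpw : l.Pairwise (· ≤ ·)) (hge : ∀ x ∈ l, v ≤ x) :
    (l.dropWhile (fun x => x == v)).count v = 0 := by
  induction l with
  | nil => simp
  | cons a tl ih =>
    rw [List.pairwise_cons] at hpw
    by_cases ha : (a == v) = true
    · rw [List.dropWhile_cons, if_pos ha]
      exact ih hpw.2 (fun x hx => hge x (List.mem_cons_of_mem _ hx))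
    · rw [List.dropWhile_cons, if_neg ha]
      have hav : a ≠ v := by simpa using ha
      have hva : v < a := lt_of_le_of_ne (hge a (List.mem_cons_self)) (Ne.symm hav)
      rw [List.count_eq_zero]
      intro hmem
      rcases List.mem_cons.mp hmem with h | h
      · exact hav h.symm
      · exact absurd (hpw.1 v h) (by omega)

-- every element of the leading run equals v
theorem count_takeWhile_self (v : Int) (l : List Int) :
    (l.takeWhile (fun x => x == v)).count v = (l.takeWhile (fun x => x == v)).length := by
  rw [List.count_eq_length]
  intro x hx
  have h2 : x = v := by simpa using List.mem_takeWhile_imp hx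
  omega

theorem count_takeWhile_ne (v w : Int) (hw : w ≠ v) (l : List Int) :
    (l.takeWhile (fun x => x == v)).count w = 0 := by
  rw [List.count_eq_zero]
  intro hmem
  have := List.mem_takeWhile_imp hmem
  exact hw (by simpa using this)

-- characterisation of B's run scan on a sorted list
theorem runScanB_iff (played : Int) :
    ∀ (n : Nat) (l : List Int), l.length ≤ n → l.Pairwise (· ≤ ·) →
      (runScanB played l = true ↔ ∃ v : Int, (played < v ∧ v < 6) ∧ (l.count v : Int) = pvMaxv v) := by
  have hnil : ∀ (pl : Int), (runScanB pl [] = true ↔ ∃ v : Int, (pl < v ∧ v < 6) ∧ (([] : List Int).count v : Int) = pvMaxv v) := by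
    intro pl
    rw [runScanB]
    constructor
    · intro h; exact absurd h (by simp)
    · rintro ⟨v, _, hc⟩
      rw [List.count_nil] at hc
      exact absurd hc.symm (by have := pvMaxv_pos v; omega)
  intro n
  induction n with
  | zero =>
    intro l hl _
    have : l = [] := List.length_eq_zero_iff.mp (Nat.le_zero.mp hl)
    subst this
    exact hnil played
  | succ n ih =>
    intro l hl hpw
    match l with
    | [] => exact hnil played
    | v :: rest =>
      rw [List.pairwise_cons] at hpw
      have hge : ∀ x ∈ rest, v ≤ x := hpw.1
      have hd_pw : (rest.dropWhile (fun x => x == v)).Pairwise (· ≤ ·) :=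
        List.Pairwise.sublist (List.dropWhile_sublist _) hpw.2
      have hd_len : (rest.dropWhile (fun x => x == v)).length ≤ n :=
        le_trans (List.Sublist.length_le (List.dropWhile_sublist _)) (Nat.le_of_succ_le_succ hl)
      have hd0 : (rest.dropWhile (fun x => x == v)).count v = 0 :=
        count_dropWhile_zero v rest hpw.2 hge
      have hsplit : rest = rest.takeWhile (fun x => x == v) ++ rest.dropWhile (fun x => x == v) :=
        (List.takeWhile_append_dropWhile).symm
      have hcv : ((v :: rest).count v : Int)
          = 1 + ((rest.takeWhile (fun x => x == v)).length : Int) := by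
        rw [List.count_cons_self]
        conv_lhs => rw [hsplit]
        rw [List.count_append, hd0, count_takeWhile_self]
        push_cast; ring
      have hcw : ∀ w : Int, w ≠ v →
          (v :: rest).count w = (rest.dropWhile (fun x => x == v)).count w := by
        intro w hw
        have h1 : (v :: rest).count w = rest.count w := by
          simp [List.count_cons, Ne.symm hw]
        rw [h1]
        conv_lhs => rw [hsplit]
        rw [List.count_append, count_takeWhile_ne v w hw]
        omega
      rw [runScanB]
      by_cases hcond : (decide (played < v) && decide (v < 6)
          && ((1 + ((rest.takeWhile (fun x => x == v)).length : Int)) == pvMaxv v)) = true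
      · rw [if_pos hcond]
        simp only [Bool.and_eq_true, decide_eq_true_eq, beq_iff_eq] at hcond
        constructor
        · intro _
          exact ⟨v, ⟨hcond.1.1, hcond.1.2⟩, by rw [hcv]; exact hcond.2⟩
        · intro _; rfl
      · rw [if_neg hcond]
        rw [ih (rest.dropWhile (fun x => x == v)) hd_len hd_pw]
        simp only [Bool.and_eq_true, decide_eq_true_eq, beq_iff_eq] at hcond
        constructor
        · rintro ⟨w, hr, hc⟩
          have hwv : w ≠ v := by
            intro h; subst h
            rw [hd0] at hc
            exact absurd hc.symm (by have := pvMaxv_pos w; omega)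
          exact ⟨w, hr, by rw [hcw w hwv]; exact hc⟩
        · rintro ⟨w, hr, hc⟩
          by_cases hwv : w = v
          · subst hwv
            rw [hcv] at hc
            exact absurd ⟨⟨hr.1, hr.2⟩, hc⟩ hcond
          · exact ⟨w, hr, by rw [← hcw w hwv]; exact hc⟩

-- the count of a value among the sorted color-filtered values equals A's matching-card count
theorem count_vals_eq (dp : List (String × Int)) (color : String) (v : Int) :
    ((PySem.List.sorted ((dp.filter (fun card => card.1 == color)).map Prod.snd) (fun x => x) false).count v : Int)
      = (dp.countP (fun card => card.1 == color && card.2 == v) : Int) := by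
  have hperm := PySem.List.sorted_perm
    (xs := (dp.filter (fun card => card.1 == color)).map Prod.snd) (key := fun x => x) (rev := false)
  rw [hperm.count_eq, List.count_eq_countP, List.countP_map, List.countP_filter]
  congr 1
  apply List.countP_congr
  intro card _
  simp only [Function.comp_apply]
  rw [Bool.and_comm]

-- ===== VERDICT (by name: the statement is the Claim_ definition above) =====
theorem interrupted_pile_py_spec : Claim_equal_interrupted_pile_py := by
  intro tc dp color _ _
  unfold Spec_interrupted_pile_py interrupted_pile_py interrupted_pile_py_alt
  cases hg : (PySem.Dict.mk tc).get? color with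
  | none => rfl
  | some pile =>
    have hpw : (PySem.List.sorted ((dp.filter (fun card => card.1 == color)).map Prod.snd) (fun x => x) false).Pairwise (· ≤ ·) := by
      have := PySem.List.sorted_pairwise
        (xs := (dp.filter (fun card => card.1 == color)).map Prod.snd) (key := fun x => x)
      simpa using this
    show interruptedLoopA (PySem.List.pyRange (PySem.List.len pile + 1) 6 1) dp color
        = runScanB (PySem.List.len pile) (PySem.List.sorted ((dp.filter (fun card => card.1 == color)).map Prod.snd) (fun x => x) false)
    rw [Bool.eq_iff_iff, loopA_eq_any,
      runScanB_iff (PySem.List.len pile) _ _ le_rfl hpw, List.any_eq_true]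
    constructor
    · rintro ⟨v, hmem, hp⟩
      rw [PySem.List.mem_pyRange_one] at hmem
      refine ⟨v, ⟨by omega, hmem.2⟩, ?_⟩
      rw [count_vals_eq]
      simpa using hp
    · rintro ⟨v, hr, hc⟩
      refine ⟨v, PySem.List.mem_pyRange_one.mpr ⟨by omega, hr.2⟩, ?_⟩
      rw [count_vals_eq] at hc
      simpa using hc
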